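-- pv_equiv track=rewrite | github.com/Navelam/Student-_Performance_Analysis_System | utils/ai_optimization.py | _count_conflicts
-- ===== SOURCE A (Python) =====
-- def _count_conflicts(individual):
--     """Count scheduling conflicts"""
--     conflicts = 0
--     seen = set()
--
--     for item in individual:
--         key = f"{item['date']}_{item['session']}"
--         if key in seen:
--             conflicts += 1
--         else:
--             seen.add(key)
--
--     return conflicts
-- ===== SOURCE B (Python) =====
-- def _count_conflicts(individual):
--     """Count scheduling conflicts"""
--     counts = {}
--     for item in individual:
--         key = f"{item['date']}_{item['session']}"
--         counts[key] = counts.get(key, 0) + 1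
--     return sum(c - 1 for c in counts.values())
-- ===== Notes on version B (the rewrite author's own statement) =====
-- stated objective: alternative
-- what changed: Replaces A's single-pass seen-set membership test with a two-stage count-minus-distinct decomposition: build a frequency table of date_session keys in one pass, then aggregate conflicts as the sum of (count - 1) over the table's values.
import Mathlib
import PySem

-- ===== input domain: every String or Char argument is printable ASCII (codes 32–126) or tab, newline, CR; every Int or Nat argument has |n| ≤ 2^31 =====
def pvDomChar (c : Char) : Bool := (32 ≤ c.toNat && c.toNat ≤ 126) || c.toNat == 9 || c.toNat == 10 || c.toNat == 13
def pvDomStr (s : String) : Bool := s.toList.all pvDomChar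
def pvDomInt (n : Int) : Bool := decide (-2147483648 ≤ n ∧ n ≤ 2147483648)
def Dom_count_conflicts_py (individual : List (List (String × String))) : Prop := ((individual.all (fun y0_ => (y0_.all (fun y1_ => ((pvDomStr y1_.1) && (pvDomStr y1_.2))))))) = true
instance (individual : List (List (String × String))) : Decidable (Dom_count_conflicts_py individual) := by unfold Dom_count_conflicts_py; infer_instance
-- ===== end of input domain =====

-- B differs from A by a two-stage count-minus-distinct decomposition (frequency table, then
-- aggregate sum of (count - 1)) instead of A's incremental seen-set conflict counter; same O(n) cost.

-- ===== PORT A =====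
-- key = f"{item['date']}_{item['session']}"  (item is a Python dict; missing key = KeyError, excluded by Pre_)
def conflictKeyA (item : List (String × String)) : String :=
  ((PySem.Dict.get? (PySem.Dict.mk item) "date").getD "") ++ "_" ++
    ((PySem.Dict.get? (PySem.Dict.mk item) "session").getD "")

def count_conflicts_py (individual : List (List (String × String))) : Int :=
  (individual.foldl
    (fun st item =>
      let key := conflictKeyA item
      if PySem.Set.contains st.2 key then (st.1 + 1, st.2)
      else (st.1, PySem.Set.add st.2 key))
    ((0 : Int), (PySem.Set.empty : PySem.Set String))).1

-- ===== PORT B =====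
def conflictKeyB (item : List (String × String)) : String :=
  ((PySem.Dict.get? (PySem.Dict.mk item) "date").getD "") ++ "_" ++
    ((PySem.Dict.get? (PySem.Dict.mk item) "session").getD "")

def count_conflicts_py_alt (individual : List (List (String × String))) : Int :=
  let keys := individual.map conflictKeyB
  let counts : PySem.Dict String Int :=
    keys.foldl (fun d k => d.insert k (d.getD k 0 + 1)) PySem.Dict.empty
  (PySem.Dict.values counts).foldl (fun s c => s + (c - 1)) 0

-- ===== PRECONDITION & SPEC =====
-- Pre_ excludes exactly the inputs where Python A raises KeyError: an item without a 'date' or 'session' key.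
def Pre_count_conflicts_py (individual : List (List (String × String))) : Prop :=
  (individual.all (fun item =>
    (PySem.Dict.get? (PySem.Dict.mk item) "date").isSome &&
    (PySem.Dict.get? (PySem.Dict.mk item) "session").isSome)) = true
instance (individual : List (List (String × String))) : Decidable (Pre_count_conflicts_py individual) := by
  unfold Pre_count_conflicts_py; infer_instance

def pvWitness_count_conflicts_py : (List (List (String × String))) :=
  [[("date", "2024-01-01"), ("session", "morning")],
   [("date", "2024-01-01"), ("session", "morning")],
   [("date", "2024-01-02"), ("session", "evening")]]

def Spec_count_conflicts_py (individual : List (List (String × String))) (out : Int) : Prop := out = count_conflicts_py_alt individual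
instance (individual : List (List (String × String))) (out : Int) : Decidable (Spec_count_conflicts_py individual out) := by unfold Spec_count_conflicts_py; infer_instance

-- ===== CLAIM (what is proved, stated in full; the proofs are below) =====
def Claim_equal_count_conflicts_py : Prop := ∀ (individual : List (List (String × String))), Dom_count_conflicts_py individual → Pre_count_conflicts_py individual → Spec_count_conflicts_py individual (count_conflicts_py individual)

-- ===== LEMMAS AND PROOFS =====

-- A's loop, over the key list: conflicts-so-far plus distinct-seen grows by exactly one per element.
lemma foldA_inv (l : List String) (c : Int) (s : PySem.Set String) :
    (l.foldl
      (fun st k => if PySem.Set.contains st.2 k then (st.1 + 1, st.2)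
                   else (st.1, PySem.Set.add st.2 k)) (c, s)).1
      + ((PySem.Set.update s l).length : Int)
      = c + (s.length : Int) + (l.length : Int) := by
  induction l generalizing c s with
  | nil => simp [PySem.Set.update]
  | cons k t ih =>
    by_cases h : PySem.Set.contains s k
    · have hmem : k ∈ s := by simpa using h
      simp only [List.foldl_cons, h, if_pos]
      have hadd : PySem.Set.add s k = s := by simp [PySem.Set.add, hmem]
      have := ih (c + 1) s
      simp only [PySem.Set.update, List.foldl_cons, hadd] at this ⊢
      push_cast [List.length_cons] at this ⊢
      omega
    · have hmem : k ∉ s := by simpa using h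
      simp only [List.foldl_cons, h, if_neg, Bool.not_eq_true]
      have hadd : PySem.Set.add s k = s ++ [k] := by simp [PySem.Set.add, hmem]
      have := ih c (PySem.Set.add s k)
      simp only [PySem.Set.update, List.foldl_cons, hadd, List.length_append,
        List.length_singleton] at this ⊢
      push_cast [List.length_cons] at this ⊢
      omega

lemma count_conflicts_py_closed (individual : List (List (String × String))) :
    count_conflicts_py individual
      = (individual.length : Int)
        - ((PySem.Set.ofList (individual.map conflictKeyA)).length : Int) := by
  unfold count_conflicts_py
  show (List.foldl
      (fun (st : Int × PySem.Set String) item =>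
        if PySem.Set.contains st.2 (conflictKeyA item) then (st.1 + 1, st.2)
        else (st.1, PySem.Set.add st.2 (conflictKeyA item)))
      ((0 : Int), (PySem.Set.empty : PySem.Set String)) individual).1 = _
  rw [← List.foldl_map (f := conflictKeyA)
    (g := fun (st : Int × PySem.Set String) k =>
      if PySem.Set.contains st.2 k then (st.1 + 1, st.2) else (st.1, PySem.Set.add st.2 k))
    (l := individual) (init := ((0 : Int), (PySem.Set.empty : PySem.Set String)))]
  have := foldA_inv (individual.map conflictKeyA) 0 PySem.Set.empty
  simp only [PySem.Set.update, PySem.Set.ofList_eq_foldl, PySem.Set.empty] at this ⊢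
  simp only [List.length_map, List.length_nil, Nat.cast_zero] at this
  omega

-- sum of (f k - 1) over a list, as sum of f minus the length
lemma sum_map_sub_one (S : List String) (f : String → Int) :
    (S.map (fun k => f k - 1)).sum = (S.map f).sum - (S.length : Int) := by
  induction S with
  | nil => simp
  | cons a t ih => simp [ih]; ring

lemma count_conflicts_py_alt_closed (individual : List (List (String × String))) :
    count_conflicts_py_alt individual
      = (individual.length : Int)
        - ((PySem.Set.ofList (individual.map conflictKeyB)).length : Int) := by
  unfold count_conflicts_py_alt
  show (PySem.Dict.values
      ((individual.map conflictKeyB).foldl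
        (fun (d : PySem.Dict String Int) k => d.insert k (d.getD k 0 + 1)) PySem.Dict.empty)).foldl
      (fun s c => s + (c - 1)) 0 = _
  rw [PySem.Dict.foldl_insert_getD_add_one_eq_counter]
  rw [PySem.List.foldl_add (g := fun c => c - 1)]
  have hv : (PySem.Dict.counter (individual.map conflictKeyB)).values
      = (PySem.Set.ofList (individual.map conflictKeyB)).map
          (fun k => ((individual.map conflictKeyB).count k : Int)) := by
    show ((PySem.Dict.counter (individual.map conflictKeyB)).items.map (·.2)) = _
    rw [PySem.Dict.items_counter]
    simp [List.map_map, Function.comp]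
  rw [hv, List.map_map]
  have : ((PySem.Set.ofList (individual.map conflictKeyB)).map
      ((fun c => c - 1) ∘ fun k => ((individual.map conflictKeyB).count k : Int))).sum
      = ((PySem.Set.ofList (individual.map conflictKeyB)).map
          (fun k => ((individual.map conflictKeyB).count k : Int) - 1)).sum := rfl
  rw [this, sum_map_sub_one]
  -- Σ over the distinct keys of their multiplicities = total number of keys
  have hperm : (PySem.Set.ofList (individual.map conflictKeyB)).Perm
      (individual.map conflictKeyB).dedup := by
    rw [List.perm_ext_iff_of_nodup (PySem.Set.nodup_ofList _) (List.nodup_dedup _)]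
    intro a
    rw [PySem.Set.mem_ofList, List.mem_dedup]
  have hsum : ((PySem.Set.ofList (individual.map conflictKeyB)).map
      (fun k => ((individual.map conflictKeyB).count k : Int))).sum
      = ((individual.map conflictKeyB).length : Int) := by
    rw [(hperm.map _).sum_eq]
    have hc := List.sum_map_count_dedup_eq_length (individual.map conflictKeyB)
    have : ((individual.map conflictKeyB).dedup.map
        (fun k => ((individual.map conflictKeyB).count k : Int))).sum
        = (((individual.map conflictKeyB).dedup.map
            (fun k => (individual.map conflictKeyB).count k)).sum : Int) := by
      push_cast
      rw [List.map_map]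
      rfl
    rw [this, hc]
  rw [hsum]
  simp

-- ===== VERDICT (by name: the statement is the Claim_ definition above) =====
theorem count_conflicts_py_spec : Claim_equal_count_conflicts_py := by
  intro individual _ _
  show count_conflicts_py individual = count_conflicts_py_alt individual
  rw [count_conflicts_py_closed, count_conflicts_py_alt_closed]
  rfl
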